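-- pv_equiv track=rewrite | github.com/opendatalab/MinerU | mineru/cli/api_client.py | strip_local_api_network_args
-- ===== SOURCE A (Python) =====
-- from typing import Callable, Optional, Sequence
--
-- def strip_local_api_network_args(extra_cli_args: Sequence[str]) -> tuple[str, ...]:
--     remaining_args: list[str] = []
--     i = 0
--
--     while i < len(extra_cli_args):
--         arg = extra_cli_args[i]
--         if arg == "--host":
--             next_index = i + 1
--             if next_index < len(extra_cli_args) and not extra_cli_args[next_index].startswith("--"):
--                 i += 2
--             else:
--                 i += 1
--             continue
--
--         if arg == "--port":
--             next_index = i + 1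
--             if next_index < len(extra_cli_args) and not extra_cli_args[next_index].startswith("--"):
--                 i += 2
--             else:
--                 i += 1
--             continue
--
--         if arg.startswith("--host="):
--             i += 1
--             continue
--
--         if arg.startswith("--port="):
--             i += 1
--             continue
--
--         remaining_args.append(arg)
--         i += 1
--
--     return tuple(remaining_args)
-- ===== SOURCE B (Python) =====
-- def strip_local_api_network_args(extra_cli_args):
--     # Stateless pairwise formulation: an argument is kept unless it is one of the
--     # network flags / their '=' forms, or it sits right after a literal "--host"/"--port"
--     # and does not itself start with "--" (i.e. it is that flag's value).  This is exact
--     # because "--host"/"--port" start with "--" and therefore can never themselves be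
--     # consumed as a value, so the literal predecessor test coincides with A's skip.
--     args = list(extra_cli_args)
--     return tuple(
--         arg
--         for prev, arg in zip([None] + args, args)
--         if arg not in ("--host", "--port")
--         and not arg.startswith(("--host=", "--port="))
--         and not (prev in ("--host", "--port") and not arg.startswith("--"))
--     )
-- ===== Notes on version B (the rewrite author's own statement) =====
-- stated objective: alternative
-- what changed: Replaces A's stateful index walk with i+=2 look-ahead by a stateless zip-with-predecessor comprehension: each element is paired with its literal predecessor and kept or dropped by a pure predicate on that pair (correct because --host/--port start with '--' and so can never be consumed as values themselves).
import Mathlib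
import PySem

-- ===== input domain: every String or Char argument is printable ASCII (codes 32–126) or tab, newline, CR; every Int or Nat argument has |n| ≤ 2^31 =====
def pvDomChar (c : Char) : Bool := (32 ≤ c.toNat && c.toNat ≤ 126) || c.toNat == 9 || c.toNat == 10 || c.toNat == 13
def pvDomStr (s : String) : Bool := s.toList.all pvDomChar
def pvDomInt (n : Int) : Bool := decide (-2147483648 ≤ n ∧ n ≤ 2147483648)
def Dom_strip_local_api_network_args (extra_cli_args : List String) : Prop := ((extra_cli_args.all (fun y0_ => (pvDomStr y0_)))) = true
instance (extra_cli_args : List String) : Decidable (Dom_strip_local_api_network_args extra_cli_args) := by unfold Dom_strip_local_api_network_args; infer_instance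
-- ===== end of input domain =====

-- B replaces A's stateful index walk (i += 2 look-ahead) by a stateless zip-with-predecessor
-- filter: each element is paired with its literal predecessor and judged by a pure predicate.
-- Equal cost, different algorithmic formulation.

-- ===== PORT A =====
-- transliteration of A's while loop over index i
def stripGoA (xs : List String) (i : Nat) (acc : List String) : List String :=
  if h : i < xs.length then
    let arg := xs[i]
    if arg = "--host" then
      if h2 : i + 1 < xs.length then
        if ¬ (PySem.Str.startswith xs[i+1] "--" = true) then
          stripGoA xs (i+2) acc
        else
          stripGoA xs (i+1) acc
      else
        stripGoA xs (i+1) acc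
    else if arg = "--port" then
      if h2 : i + 1 < xs.length then
        if ¬ (PySem.Str.startswith xs[i+1] "--" = true) then
          stripGoA xs (i+2) acc
        else
          stripGoA xs (i+1) acc
      else
        stripGoA xs (i+1) acc
    else if PySem.Str.startswith arg "--host=" = true then
      stripGoA xs (i+1) acc
    else if PySem.Str.startswith arg "--port=" = true then
      stripGoA xs (i+1) acc
    else
      stripGoA xs (i+1) (acc ++ [arg])
  else acc
termination_by xs.length - i
decreasing_by all_goals omega

def strip_local_api_network_args (extra_cli_args : List String) : List String :=
  stripGoA extra_cli_args 0 []

-- ===== PORT B =====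
-- B's pure keep/drop predicate on a (predecessor, argument) pair
def keepB (prev : Option String) (arg : String) : Bool :=
  !(arg == "--host" || arg == "--port")
  && !(PySem.Str.startswith arg "--host=" || PySem.Str.startswith arg "--port=")
  && !((prev == some "--host" || prev == some "--port") && !(PySem.Str.startswith arg "--"))

def strip_local_api_network_args_alt (extra_cli_args : List String) : List String :=
  (((none :: extra_cli_args.map some).zip extra_cli_args).filter
    (fun p => keepB p.1 p.2)).map Prod.snd

-- ===== PRECONDITION & SPEC =====
def Spec_strip_local_api_network_args (extra_cli_args : List String) (out : List String) : Prop := out = strip_local_api_network_args_alt extra_cli_args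
instance (extra_cli_args : List String) (out : List String) : Decidable (Spec_strip_local_api_network_args extra_cli_args out) := by unfold Spec_strip_local_api_network_args; infer_instance

-- ===== CLAIM (what is proved, stated in full; the proofs are below) =====
def Claim_equal_strip_local_api_network_args : Prop := ∀ (extra_cli_args : List String), Dom_strip_local_api_network_args extra_cli_args → Spec_strip_local_api_network_args extra_cli_args (strip_local_api_network_args extra_cli_args)

-- ===== LEMMAS AND PROOFS =====

-- reference recursion capturing A's loop: d = "previous element was a consumed network flag"
def refD : Bool → List String → List String
  | _, [] => []
  | d, a :: r =>
    if d = true ∧ ¬ (PySem.Str.startswith a "--" = true) then refD false r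
    else if a = "--host" ∨ a = "--port" then refD true r
    else if PySem.Str.startswith a "--host=" = true ∨ PySem.Str.startswith a "--port=" = true then refD false r
    else a :: refD false r

-- B's zip-filter as a structural recursion over (predecessor, rest)
def refB : Option String → List String → List String
  | _, [] => []
  | p, a :: r => if keepB p a then a :: refB (some a) r else refB (some a) r

theorem zip_filter_eq_refB (xs : List String) : ∀ (p : Option String),
    (((p :: xs.map some).zip xs).filter (fun q => keepB q.1 q.2)).map Prod.snd = refB p xs := by
  induction xs with
  | nil => intro p; simp [refB]
  | cons a r ih =>
    intro p
    simp only [List.map_cons, List.zip_cons_cons, List.filter_cons, refB]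
    by_cases h : keepB p a = true
    · simp [h, ih (some a)]
    · simp [h, ih (some a)]

theorem flag_sw {a : String} (h : a = "--host" ∨ a = "--port") :
    PySem.Str.startswith a "--" = true := by
  rcases h with h | h <;> subst h <;> decide

theorem refB_eq_refD (xs : List String) : ∀ (p : Option String),
    refB p xs = refD (decide (p = some "--host" ∨ p = some "--port")) xs := by
  induction xs with
  | nil => intro p; simp [refB, refD]
  | cons a r ih =>
    intro p
    by_cases hf : a = "--host" ∨ a = "--port"
    · -- a is a flag: it starts with "--", so it is never consumed as a value
      have hsw := flag_sw hf
      have hk : keepB p a = false := by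
        rcases hf with h | h <;> subst h <;> simp [keepB]
      have hd : (decide (some a = some "--host" ∨ some a = some "--port")) = true := by
        simp [hf]
      simp only [refB, refD, hk, Bool.false_eq_true, if_false, ih (some a), hd]
      rw [if_neg (fun h => h.2 hsw), if_pos hf]
    · have hd : (decide (some a = some "--host" ∨ some a = some "--port")) = false := by
        simp [hf]
      by_cases hp : (p = some "--host" ∨ p = some "--port") ∧ ¬ (PySem.Str.startswith a "--" = true)
      · -- value slot: dropped by both
        have hk : keepB p a = false := by
          rcases hp with ⟨hp1, hp2⟩
          have hp2' : PySem.Str.startswith a "--" = false := Bool.eq_false_iff.mpr hp2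
          rcases hp1 with h | h <;> subst h <;>
            simp only [keepB] <;> rw [hp2'] <;> simp
        simp only [refB, refD, hk, Bool.false_eq_true, if_false, ih (some a), hd]
        rw [if_pos ⟨by simp [hp.1], hp.2⟩]
      · -- ordinary position: the d-branch of refD does not fire
        have hnd : ¬ ((decide (p = some "--host" ∨ p = some "--port")) = true ∧ ¬ (PySem.Str.startswith a "--" = true)) := by
          intro ⟨h1, h2⟩; exact hp ⟨by simpa using h1, h2⟩
        by_cases hpre : PySem.Str.startswith a "--host=" = true ∨ PySem.Str.startswith a "--port=" = true
        · have hk : keepB p a = false := by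
            simp only [keepB]
            rcases hpre with h | h <;> rw [h] <;> simp
          simp only [refB, refD, hk, Bool.false_eq_true, if_false, ih (some a), hd]
          rw [if_neg hnd, if_neg hf, if_pos hpre]
        · have h1 : ¬ (a = "--host") := fun h => hf (Or.inl h)
          have h2 : ¬ (a = "--port") := fun h => hf (Or.inr h)
          have e3 : PySem.Str.startswith a "--host=" = false :=
            Bool.eq_false_iff.mpr (fun h => hpre (Or.inl h))
          have e4 : PySem.Str.startswith a "--port=" = false :=
            Bool.eq_false_iff.mpr (fun h => hpre (Or.inr h))
          have hk : keepB p a = true := by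
            simp only [keepB]
            rw [e3, e4]
            have e1 : (a == "--host") = false := by simp [h1]
            have e2 : (a == "--port") = false := by simp [h2]
            rw [e1, e2]
            cases hq : (p == some "--host" || p == some "--port") with
            | false => simp
            | true =>
              have hsw : PySem.Str.startswith a "--" = true := by
                by_contra hc; exact hp ⟨by simpa using hq, hc⟩
              rw [hsw]; simp
          simp only [refB, refD, hk, if_true, ih (some a), hd]
          rw [if_neg hnd, if_neg hf, if_neg hpre]

theorem stripGoA_eq (xs : List String) : ∀ (i : Nat) (acc : List String),
    stripGoA xs i acc = acc ++ refD false (xs.drop i) := by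
  have main : ∀ (n i : Nat), xs.length - i ≤ n → ∀ acc,
      stripGoA xs i acc = acc ++ refD false (xs.drop i) := by
    intro n
    induction n with
    | zero =>
      intro i hle acc
      have h : ¬ i < xs.length := by omega
      rw [stripGoA]
      simp [h, List.drop_of_length_le (by omega : xs.length ≤ i), refD]
    | succ n ih =>
      intro i hle acc
      by_cases h : i < xs.length
      · have hdrop : xs.drop i = xs[i] :: xs.drop (i+1) := List.drop_eq_getElem_cons h
        rw [stripGoA]
        simp only [h, dif_pos]
        split_ifs with hhost h2 hsw hport h2 hsw hhe hpe
        · have hdrop2 : xs.drop (i+1) = xs[i+1] :: xs.drop (i+2) := List.drop_eq_getElem_cons h2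
          rw [ih (i+1) (by omega) acc, hdrop, hdrop2, hhost]
          have hsw2 : PySem.Chars.startswith xs[i+1].toList ['-','-'] = true := by
            simpa using hsw
          simp [refD, hsw2]
        · have hdrop2 : xs.drop (i+1) = xs[i+1] :: xs.drop (i+2) := List.drop_eq_getElem_cons h2
          rw [ih (i+2) (by omega) acc, hdrop, hdrop2, hhost]
          have hsw2 : PySem.Chars.startswith xs[i+1].toList ['-','-'] = false := by
            simpa using hsw
          simp [refD, hsw2]
        · rw [ih (i+1) (by omega) acc, hdrop, hhost,
            List.drop_of_length_le (by omega : xs.length ≤ i + 1)]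
          simp [refD]
        · have hdrop2 : xs.drop (i+1) = xs[i+1] :: xs.drop (i+2) := List.drop_eq_getElem_cons h2
          rw [ih (i+1) (by omega) acc, hdrop, hdrop2, hport]
          have hsw2 : PySem.Chars.startswith xs[i+1].toList ['-','-'] = true := by
            simpa using hsw
          simp [refD, hsw2]
        · have hdrop2 : xs.drop (i+1) = xs[i+1] :: xs.drop (i+2) := List.drop_eq_getElem_cons h2
          rw [ih (i+2) (by omega) acc, hdrop, hdrop2, hport]
          have hsw2 : PySem.Chars.startswith xs[i+1].toList ['-','-'] = false := by
            simpa using hsw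
          simp [refD, hsw2]
        · rw [ih (i+1) (by omega) acc, hdrop, hport,
            List.drop_of_length_le (by omega : xs.length ≤ i + 1)]
          simp [refD]
        · rw [ih (i+1) (by omega) acc, hdrop]
          have hhe2 : PySem.Chars.startswith xs[i].toList ['-','-','h','o','s','t','='] = true := by
            simpa using hhe
          simp [refD, hhost, hport, hhe2]
        · rw [ih (i+1) (by omega) acc, hdrop]
          have hhe2 : PySem.Chars.startswith xs[i].toList ['-','-','h','o','s','t','='] = false := by
            simpa using hhe
          have hpe2 : PySem.Chars.startswith xs[i].toList ['-','-','p','o','r','t','='] = true := by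
            simpa using hpe
          simp [refD, hhost, hport, hhe2, hpe2]
        · rw [ih (i+1) (by omega) (acc ++ [xs[i]]), hdrop]
          have hhe2 : PySem.Chars.startswith xs[i].toList ['-','-','h','o','s','t','='] = false := by
            simpa using hhe
          have hpe2 : PySem.Chars.startswith xs[i].toList ['-','-','p','o','r','t','='] = false := by
            simpa using hpe
          simp [refD, hhost, hport, hhe2, hpe2]
      · rw [stripGoA]
        simp [h, List.drop_of_length_le (by omega : xs.length ≤ i), refD]
  intro i acc
  exact main (xs.length - i) i le_rfl acc

-- ===== VERDICT (by name: the statement is the Claim_ definition above) =====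
theorem strip_local_api_network_args_spec : Claim_equal_strip_local_api_network_args := by
  intro xs _
  unfold Spec_strip_local_api_network_args strip_local_api_network_args strip_local_api_network_args_alt
  rw [stripGoA_eq xs 0 [], zip_filter_eq_refB xs none, refB_eq_refD xs none]
  simp
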